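-- pv_equiv track=rewrite | github.com/Henrique-zoo/APC | Nível 2/3960 - CorrijaMinhaRedacao.py | criandoString
-- ===== SOURCE A (Python) =====
-- def criandoString(a, b):
--     aspas = [i for i in range(len(a)) if a[i] == '"']
--     substring = ''
--     if len(aspas) > 1:
--         for i in range(aspas[0], aspas[1] + 1):
--             substring += a[i]
--         b.append(len(substring))
--         string = a.replace(substring, "$")
--         return criandoString(string, b)
--     return a, b
-- ===== SOURCE B (Python) =====
-- def criandoString(a, b):
--     # Iterative rewrite: loop with partition/slice instead of recursion with an
--     # index comprehension. Appends to b in place, like the original.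
--     s = a
--     while True:
--         _, sep1, rest = s.partition('"')
--         mid, sep2, _ = rest.partition('"')
--         if not sep2:
--             return s, b
--         seg = '"' + mid + '"'
--         b.append(len(seg))
--         s = s.replace(seg, "$")
-- ===== Notes on version B (the rewrite author's own statement) =====
-- stated objective: simpler
-- what changed: Replaced A's recursion that collects the full list of quote indices with a comprehension and builds the segment char-by-char, by an iterative while loop that partitions the string at the first two quotes and slices the segment out directly.
import Mathlib
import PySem

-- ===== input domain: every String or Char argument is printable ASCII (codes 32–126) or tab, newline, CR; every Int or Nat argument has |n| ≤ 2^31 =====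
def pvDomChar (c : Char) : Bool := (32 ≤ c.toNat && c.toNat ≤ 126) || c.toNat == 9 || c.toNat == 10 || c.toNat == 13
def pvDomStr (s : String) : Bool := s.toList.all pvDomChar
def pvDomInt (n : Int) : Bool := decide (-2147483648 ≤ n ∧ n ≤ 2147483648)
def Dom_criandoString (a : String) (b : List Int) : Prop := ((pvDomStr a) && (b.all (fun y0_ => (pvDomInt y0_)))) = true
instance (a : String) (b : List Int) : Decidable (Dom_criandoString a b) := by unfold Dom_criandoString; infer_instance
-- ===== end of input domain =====

-- B replaces A's recursion + quote-index comprehension + char-by-char segment build with an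
-- iterative partition/slice loop (objective: simpler). Both Pythons append to the argument list
-- `b` in place; the theorems here are about the returned pair (which contains that list's value).

-- ===== PORT A =====
-- aspas = [i for i in range(len(a)) if a[i] == '"']
def pvQuoteIdxs (l : List Char) : List Int :=
  (PySem.List.pyRange 0 l.length 1).filter (fun i => PySem.List.pyGet? l i == some '"')

-- substring accumulation: for i in range(i0, j0 + 1): substring += a[i]
-- (every index drawn from aspas is a valid index of `a`, so the `.getD ' '` default is never used)
def pvBuildSub (l : List Char) (i0 j0 : Int) : List Char :=
  (PySem.List.pyRange i0 (j0 + 1) 1).foldl (fun acc i => acc ++ [(PySem.List.pyGet? l i).getD ' ']) []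

-- the recursion, fuelled: each call strictly shrinks the string (the replaced segment has length
-- ≥ 2 and occurs at least once), so `length + 1` steps always suffice
def criandoStringAuxA : Nat → List Char → List Int → List Char × List Int
  | 0, l, b => (l, b)
  | (fuel+1), l, b =>
    match pvQuoteIdxs l with
    | i0 :: j0 :: _ =>
        let sub := pvBuildSub l i0 j0
        criandoStringAuxA fuel (PySem.Chars.replace l sub ['$']) (b ++ [(sub.length : Int)])
    | _ => (l, b)

def criandoString (a : String) (b : List Int) : String × List Int :=
  let r := criandoStringAuxA (a.toList.length + 1) a.toList b
  (String.ofList r.1, r.2)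

-- ===== PORT B =====
-- the while loop, fuelled the same way; partition('"') = takeWhile/dropWhile at the first quote
def criandoStringAuxB : Nat → List Char → List Int → List Char × List Int
  | 0, s, b => (s, b)
  | (fuel+1), s, b =>
    match s.dropWhile (· ≠ '"') with
    | _ :: rest =>
      let mid := rest.takeWhile (· ≠ '"')
      match rest.dropWhile (· ≠ '"') with
      | _ :: _ =>
          criandoStringAuxB fuel (PySem.Chars.replace s ('"' :: (mid ++ ['"'])) ['$'])
            (b ++ [(mid.length : Int) + 2])
      | [] => (s, b)
    | [] => (s, b)

def criandoString_alt (a : String) (b : List Int) : String × List Int :=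
  let r := criandoStringAuxB (a.toList.length + 1) a.toList b
  (String.ofList r.1, r.2)

-- ===== PRECONDITION & SPEC =====
def Spec_criandoString (a : String) (b : List Int) (out : String × List Int) : Prop := out = criandoString_alt a b
instance (a : String) (b : List Int) (out : String × List Int) : Decidable (Spec_criandoString a b out) := by unfold Spec_criandoString; infer_instance

-- ===== CLAIM (what is proved, stated in full; the proofs are below) =====
def Claim_equal_criandoString : Prop := ∀ (a : String) (b : List Int), Dom_criandoString a b → Spec_criandoString a b (criandoString a b)

-- ===== LEMMAS AND PROOFS =====

-- Nat-valued quote-index list, for reasoning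
def qIdxN : List Char → List Nat
  | [] => []
  | c :: xs => if c = '"' then 0 :: (qIdxN xs).map (· + 1) else (qIdxN xs).map (· + 1)

theorem pyRange_zero_len (n : Nat) :
    PySem.List.pyRange 0 n 1 = (List.range n).map (Nat.cast : Nat → Int) := by
  rw [PySem.List.pyRange_of_pos 0 n (by norm_num)]
  rcases Nat.eq_zero_or_pos n with h | h
  · subst h; norm_num
  · have h0 : (0 : Int) < (n : Int) := by exact_mod_cast h
    have h1 : ((n : Int) - 0 + 1 - 1) / 1 = (n : Int) := by omega
    rw [if_pos h0, h1, Int.toNat_natCast]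
    exact List.map_congr_left (fun k _ => by omega)

theorem qIdxN_spec (l : List Char) :
    (List.range l.length).filter (fun k => l[k]? == some '"') = qIdxN l := by
  induction l with
  | nil => simp [qIdxN]
  | cons c xs ih =>
    rw [List.length_cons, List.range_succ_eq_map, List.filter_cons, List.filter_map, qIdxN]
    have htail : List.filter ((fun k => (c :: xs)[k]? == some '"') ∘ Nat.succ) (List.range xs.length)
        = List.filter (fun k => xs[k]? == some '"') (List.range xs.length) :=
      List.filter_congr (fun k _ => by simp)
    rw [htail, ih]
    by_cases hc : c = '"'
    · subst hc
      simp
    · simp [hc]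

theorem pvQuoteIdxs_eq (l : List Char) :
    pvQuoteIdxs l = (qIdxN l).map (Nat.cast : Nat → Int) := by
  have hfc : List.filter ((fun i => PySem.List.pyGet? l i == some '"') ∘ (Nat.cast : Nat → Int))
      (List.range l.length) = List.filter (fun k => l[k]? == some '"') (List.range l.length) :=
    List.filter_congr (fun k _ => by simp [PySem.List.pyGet?_natCast])
  rw [pvQuoteIdxs, pyRange_zero_len, List.filter_map, hfc, qIdxN_spec]

theorem qIdxN_no_quote (t : List Char) (h : ∀ c ∈ t, c ≠ '"') : qIdxN t = [] := by
  induction t with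
  | nil => rfl
  | cons c xs ih =>
    rw [qIdxN, if_neg (h c (by simp)), ih (fun c hc => h c (by simp [hc]))]
    rfl

theorem qIdxN_append_nf (t l : List Char) (h : ∀ c ∈ t, c ≠ '"') :
    qIdxN (t ++ l) = (qIdxN l).map (· + t.length) := by
  induction t with
  | nil => simp
  | cons c xs ih =>
    rw [List.cons_append, qIdxN, if_neg (h c (by simp)), ih (fun c hc => h c (by simp [hc]))]
    rw [List.map_map]
    refine List.map_congr_left (fun x _ => ?_)
    simp only [Function.comp, List.length_cons]
    omega

-- the char-by-char build over range(i0, j0+1) is the slice l[i0 : j0+1]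
theorem build_eq (n : Nat) : ∀ (a : Nat) (l : List Char) (init : List Char), a + n ≤ l.length →
    (PySem.List.pyRange (a : Int) ((a : Int) + n) 1).foldl
      (fun acc i => acc ++ [(PySem.List.pyGet? l i).getD ' ']) init
    = init ++ (l.drop a).take n := by
  induction n with
  | zero =>
    intro a l init _
    rw [PySem.List.pyRange_of_pos _ _ (by norm_num)]
    simp
  | succ n ih =>
    intro a l init h
    rw [PySem.List.pyRange_one_cons (by push_cast; omega)]
    simp only [List.foldl_cons]
    have ha : a < l.length := by omega
    have hget : PySem.List.pyGet? l (a : Int) = some l[a] := by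
      rw [PySem.List.pyGet?_natCast]; exact List.getElem?_eq_getElem ha
    rw [hget]
    have hcast : (a : Int) + 1 = ((a + 1 : Nat) : Int) := by push_cast; ring
    have hcast2 : ((a : Int)) + (n + 1 : Nat) = ((a + 1 : Nat) : Int) + (n : Nat) := by push_cast; ring
    rw [hcast2, hcast, ih (a + 1) l _ (by omega)]
    rw [List.drop_eq_getElem_cons ha, List.take_succ_cons]
    simp

theorem takeWhile_ne_quote {t : List Char} (h : t = t.takeWhile (· ≠ '"')) :
    ∀ c ∈ t, c ≠ '"' := by
  intro c hc
  have := List.mem_takeWhile_imp (h ▸ hc)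
  simpa using this

theorem dropWhile_head_false {α : Type} (p : α → Bool) :
    ∀ (l : List α) (x : α) (xs : List α), l.dropWhile p = x :: xs → p x = false := by
  intro l
  induction l with
  | nil => intro x xs h; simp at h
  | cons c cs ih =>
    intro x xs h
    rw [List.dropWhile_cons] at h
    split_ifs at h with hc
    · exact ih x xs h
    · rw [List.cons.injEq] at h
      rw [← h.1]
      simpa using hc

theorem auxA_eq_auxB (fuel : Nat) : ∀ (l : List Char) (b : List Int),
    criandoStringAuxA fuel l b = criandoStringAuxB fuel l b := by
  induction fuel with
  | zero => intro l b; rfl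
  | succ fuel ih =>
    intro l b
    have hsplit : l.takeWhile (· ≠ '"') ++ l.dropWhile (· ≠ '"') = l := List.takeWhile_append_dropWhile
    have ht : ∀ c ∈ l.takeWhile (· ≠ '"'), c ≠ '"' :=
      takeWhile_ne_quote (by simp [List.takeWhile_takeWhile])
    rw [criandoStringAuxA, criandoStringAuxB]
    cases hd : l.dropWhile (· ≠ '"') with
    | nil =>
      -- no quote at all
      have hq : pvQuoteIdxs l = [] := by
        rw [pvQuoteIdxs_eq]
        conv_lhs => rw [← hsplit, hd]
        rw [List.append_nil, qIdxN_no_quote _ ht]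
        rfl
      rw [hq]
    | cons q rest =>
      have hq1 : q = '"' := by
        have := dropWhile_head_false _ _ _ _ hd
        simpa using this
      subst hq1
      have hrest : rest.takeWhile (· ≠ '"') ++ rest.dropWhile (· ≠ '"') = rest := List.takeWhile_append_dropWhile
      have hm : ∀ c ∈ rest.takeWhile (· ≠ '"'), c ≠ '"' :=
        takeWhile_ne_quote (by simp [List.takeWhile_takeWhile])
      cases hd2 : rest.dropWhile (· ≠ '"') with
      | nil =>
        -- exactly one quote
        have hq : pvQuoteIdxs l = [((l.takeWhile (· ≠ '"')).length : Int)] := by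
          rw [pvQuoteIdxs_eq]
          conv_lhs => rw [← hsplit, hd]
          rw [qIdxN_append_nf _ _ ht, qIdxN, if_pos rfl]
          have : qIdxN rest = [] := by
            rw [← hrest, hd2, List.append_nil]; exact qIdxN_no_quote _ hm
          simp [this]
        rw [hq]
        dsimp only
        rw [hd2]
      | cons q2 r =>
        have hq2 : q2 = '"' := by
          have := dropWhile_head_false _ _ _ _ hd2
          simpa using this
        subst hq2
        set t := l.takeWhile (· ≠ '"') with htdef
        set m := rest.takeWhile (· ≠ '"') with hmdef
        have hl : l = t ++ '"' :: (m ++ '"' :: r) := by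
          rw [← hsplit, hd, ← hrest, hd2]
        have hq : pvQuoteIdxs l = (t.length : Int) :: ((t.length : Int) + m.length + 1) ::
            ((qIdxN r).map (fun x => ((x + t.length + m.length + 2 : Nat) : Int))) := by
          rw [pvQuoteIdxs_eq, hl, qIdxN_append_nf _ _ ht, qIdxN, if_pos rfl,
              qIdxN_append_nf _ _ hm, qIdxN, if_pos rfl]
          simp only [List.map_cons, List.map_map]
          refine congrArg₂ _ (by push_cast; omega) (congrArg₂ _ ?_ ?_)
          · push_cast; omega
          · refine List.map_congr_left (fun x _ => ?_)
            simp only [Function.comp]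
            congr 1
            omega
        rw [hq]
        dsimp only
        rw [hd2]
        dsimp only
        -- the char-by-char built substring is exactly the segment '"' :: m ++ ['"']
        have hlen : t.length + (m.length + 2) ≤ l.length := by
          rw [hl]; simp
        have hsub : pvBuildSub l (t.length : Int) ((t.length : Int) + m.length + 1)
            = '"' :: (m ++ ['"']) := by
          rw [pvBuildSub]
          have hcast : ((t.length : Int) + m.length + 1) + 1 = (t.length : Int) + ((m.length + 2 : Nat) : Int) := by
            push_cast; ring
          rw [hcast, build_eq (m.length + 2) t.length l [] hlen]
          rw [hl, List.drop_left' rfl]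
          simp only [List.nil_append]
          rw [List.take_cons]
          congr 1
          rw [List.take_append]
          simp
          omega
        rw [hsub]
        have hblen : ((('"' :: (m ++ ['"'])).length : Nat) : Int) = (m.length : Int) + 2 := by
          push_cast [List.length_cons, List.length_append, List.length_nil]; ring
        rw [hblen]
        exact ih _ _

-- ===== VERDICT (by name: the statement is the Claim_ definition above) =====
theorem criandoString_spec : Claim_equal_criandoString := by
  intro a b _
  unfold Spec_criandoString criandoString criandoString_alt
  rw [auxA_eq_auxB]
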